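-- pv_equiv track=rewrite | github.com/kiyoshiWK/nlp_100_python | 003/nlp100_003.py | array_word_length
-- ===== SOURCE A (Python) =====
-- def array_word_length(sentence):
--     table = sentence.maketrans({
--         ',':'',
--         '.':''
--     })
--     split = sentence.translate(table).split(' ')
--     result = ''
--     for word in split:
--         result += str(len(word))
--     return result
-- ===== SOURCE B (Python) =====
-- def array_word_length(sentence):
--     # single pass: count current word length, emit on each space, skip ',' and '.'
--     result = ''
--     count = 0
--     for c in sentence:
--         if c == ',' or c == '.':
--             continue
--         if c == ' ':
--             result += str(count)
--             count = 0
--         else: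
--             count += 1
--     result += str(count)
--     return result
-- ===== Notes on version B (the rewrite author's own statement) =====
-- stated objective: alternative
-- what changed: B replaces translate + space-split + per-word len concatenation with one left-to-right character pass that keeps a running word-length counter and emits it at each space separator, never materialising the translated string or the word list.
import Mathlib
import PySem

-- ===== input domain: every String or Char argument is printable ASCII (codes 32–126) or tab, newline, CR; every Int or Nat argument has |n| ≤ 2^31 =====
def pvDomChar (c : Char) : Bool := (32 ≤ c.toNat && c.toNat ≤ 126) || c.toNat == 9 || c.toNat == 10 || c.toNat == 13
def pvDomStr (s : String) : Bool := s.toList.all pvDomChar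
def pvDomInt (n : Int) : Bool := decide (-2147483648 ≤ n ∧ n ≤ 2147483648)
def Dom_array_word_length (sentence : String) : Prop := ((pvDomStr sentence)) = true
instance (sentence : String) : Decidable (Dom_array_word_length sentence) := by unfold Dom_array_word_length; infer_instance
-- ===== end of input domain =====

-- B replaces translate + space-split + per-word len concatenation with one character pass
-- keeping a running word-length counter (objective: alternative single-pass algorithm,
-- no intermediate translated string or word list).

-- ===== PORT A =====
def array_word_length (sentence : String) : String :=
  -- translate with a table deleting ',' and '.' : hand port, exact — those two chars are removed
  let translated : List Char := sentence.toList.filter (fun c => !(c == ',' || c == '.'))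
  -- split(' '): single-character separator; List.splitOn ' ' matches Python exactly
  -- (empty pieces kept, empty input gives [''])
  let split := translated.splitOn ' '
  split.foldl (fun result word => result ++ PySem.Int.toStr (word.length : Int)) ""

-- ===== PORT B =====
def awlLoop : List Char → Int → String → String
  | [], count, result => result ++ PySem.Int.toStr count
  | c :: rest, count, result =>
    if c == ',' || c == '.' then awlLoop rest count result
    else if c == ' ' then awlLoop rest 0 (result ++ PySem.Int.toStr count)
    else awlLoop rest (count + 1) result

def array_word_length_alt (sentence : String) : String :=
  awlLoop sentence.toList 0 ""

-- ===== PRECONDITION & SPEC =====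
def Spec_array_word_length (sentence : String) (out : String) : Prop := out = array_word_length_alt sentence
instance (sentence : String) (out : String) : Decidable (Spec_array_word_length sentence out) := by unfold Spec_array_word_length; infer_instance

-- ===== CLAIM (what is proved, stated in full; the proofs are below) =====
def Claim_equal_array_word_length : Prop := ∀ (sentence : String), Dom_array_word_length sentence → Spec_array_word_length sentence (array_word_length sentence)

-- ===== LEMMAS AND PROOFS =====

/-- A's rendering fold, shifted: folding from an accumulator `r` prepends `r`. -/
theorem awl_foldl_shift (ws : List (List Char)) (r : String) :
    ws.foldl (fun result word => result ++ PySem.Int.toStr (word.length : Int)) r =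
      r ++ ws.foldl (fun result word => result ++ PySem.Int.toStr (word.length : Int)) "" := by
  induction ws generalizing r with
  | nil => simp [List.foldl]
  | cons w ws ih =>
    simp only [List.foldl]
    rw [ih (r ++ PySem.Int.toStr _), ih ("" ++ PySem.Int.toStr _)]
    simp [String.append_assoc]

/-- B's loop ignores ',' and '.', so it only depends on the filtered character list. -/
theorem awlLoop_filter (cs : List Char) : ∀ (n : Int) (r : String),
    awlLoop cs n r = awlLoop (cs.filter (fun c => !(c == ',' || c == '.'))) n r := by
  induction cs with
  | nil => intro n r; rfl
  | cons c rest ih =>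
    intro n r
    by_cases hp : (c == ',' || c == '.') = true
    · simp [awlLoop, hp, List.filter, ih]
    · by_cases hs : c = ' '
      · simp [awlLoop, hs, List.filter, ih]
      · simp [awlLoop, hp, hs, List.filter, ih]

/-- Main invariant: on a punctuation-free list, B's loop produces the count of the
current partial word followed by A's rendering of the remaining split pieces. -/
theorem awlLoop_splitOn (cs : List Char)
    (hcs : ∀ c ∈ cs, ¬((c == ',' || c == '.') = true)) : ∀ (n : Nat) (r : String),
    awlLoop cs (n : Int) r =
      r ++ PySem.Int.toStr ((n + ((cs.splitOn ' ').headI).length : Nat) : Int) ++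
        ((cs.splitOn ' ').tail).foldl
          (fun result word => result ++ PySem.Int.toStr (word.length : Int)) "" := by
  induction cs with
  | nil =>
    intro n r
    simp [awlLoop, List.splitOn_nil]
  | cons c rest ih =>
    intro n r
    have hc : ¬((c == ',' || c == '.') = true) := hcs c (List.mem_cons_self)
    have hrest : ∀ x ∈ rest, ¬((x == ',' || x == '.') = true) :=
      fun x hx => hcs x (List.mem_cons_of_mem _ hx)
    obtain ⟨h, t, hsplit⟩ := List.exists_cons_of_ne_nil (List.splitOnP_ne_nil (· == ' ') rest)
    by_cases hs : c = ' '
    · subst hs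
      show awlLoop _ _ _ = _
      simp only [awlLoop, hc, beq_self_eq_true]
      rw [show ((0 : Int)) = ((0 : Nat) : Int) by simp, ih hrest 0 (r ++ PySem.Int.toStr (n : Int))]
      simp only [List.splitOn, List.splitOnP_cons, beq_self_eq_true, ite_true, hsplit,
        List.headI, List.tail, List.foldl]
      simp [String.append_assoc]
      exact (awl_foldl_shift t _).symm
    · have hs' : ¬((c == ' ') = true) := by simp [hs]
      simp only [awlLoop, if_neg hc, if_neg hs']
      rw [show ((n : Int) + 1) = ((n + 1 : Nat) : Int) by push_cast; ring, ih hrest (n + 1) r]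
      simp only [List.splitOn, List.splitOnP_cons, if_neg hs', hsplit,
        List.modifyHead, List.headI, List.tail, List.length_cons]
      congr 3
      omega

-- ===== VERDICT (by name: the statement is the Claim_ definition above) =====
theorem array_word_length_spec : Claim_equal_array_word_length := by
  intro sentence _
  unfold Spec_array_word_length array_word_length array_word_length_alt
  rw [awlLoop_filter]
  rw [show ((0 : Int)) = ((0 : Nat) : Int) by simp]
  rw [awlLoop_splitOn _ (by intro c hc; simp only [List.mem_filter] at hc; simpa using hc.2) 0 ""]
  obtain ⟨h, t, hsplit⟩ := List.exists_cons_of_ne_nil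
    (List.splitOnP_ne_nil (· == ' ') (sentence.toList.filter (fun c => !(c == ',' || c == '.'))))
  simp only [List.splitOn] at *
  rw [hsplit]
  simp only [List.headI, List.tail, List.foldl]
  rw [awl_foldl_shift t]
  simp
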